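-- pv_equiv track=rewrite | github.com/pcm82/crossword | makeDict.py | mostIntersectionsSort
-- ===== SOURCE A (Python) =====
-- def countIntersections(word1, word2):
--     """
--     :type: word1: string, word2: string
--     :input: two words for which we count the intersections
--     :rtype: integer
--     :return: the number of non-unique characters two words have in common
--     """
--     inter = set(word1.lower()).intersection(word2.lower())
--     return len(inter)
--
-- def mostIntersectionsSort(d, currentWords):
--     """
--     :type: d: dictionary, currentWords: list of words
--     :input: a dictionary and list of words for which sort the dictionary by most intersections with the currentWords
--     :rtype: list of tuples, words and their clues
--     :return: sorted list of words and their clues from the dictionary based on how many times they intersect with words from currentWords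
--     """
--     interDict = {}
--     for key in d:
--         count = 0
--         for word in currentWords:
--             count += countIntersections(key, word)
--         interDict[key] = count
--     keys = sorted(list(d.keys()), key=lambda x: interDict[x], reverse=True)
--     array = []
--     for key in keys:
--         array.append((key, d.get(key)))
--     return array
-- ===== SOURCE B (Python) =====
-- def mostIntersectionsSort(d, currentWords):
--     # Count, for each letter, how many of currentWords contain it (once per word),
--     # then score each key by summing the counts of its distinct letters.
--     letterCount = {}
--     for word in currentWords:
--         for ch in set(word.lower()):
--             letterCount[ch] = letterCount.get(ch, 0) + 1
--     def score(key):
--         return sum(letterCount.get(ch, 0) for ch in set(key.lower()))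
--     keys = sorted(d, key=score, reverse=True)
--     return [(key, d[key]) for key in keys]
-- ===== Notes on version B (the rewrite author's own statement) =====
-- stated objective: faster
-- what changed: Instead of computing a set intersection for every (key, word) pair, B builds a per-letter counter over currentWords once and scores each key by summing the counts of its distinct letters, then sorts by that score.
import Mathlib
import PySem

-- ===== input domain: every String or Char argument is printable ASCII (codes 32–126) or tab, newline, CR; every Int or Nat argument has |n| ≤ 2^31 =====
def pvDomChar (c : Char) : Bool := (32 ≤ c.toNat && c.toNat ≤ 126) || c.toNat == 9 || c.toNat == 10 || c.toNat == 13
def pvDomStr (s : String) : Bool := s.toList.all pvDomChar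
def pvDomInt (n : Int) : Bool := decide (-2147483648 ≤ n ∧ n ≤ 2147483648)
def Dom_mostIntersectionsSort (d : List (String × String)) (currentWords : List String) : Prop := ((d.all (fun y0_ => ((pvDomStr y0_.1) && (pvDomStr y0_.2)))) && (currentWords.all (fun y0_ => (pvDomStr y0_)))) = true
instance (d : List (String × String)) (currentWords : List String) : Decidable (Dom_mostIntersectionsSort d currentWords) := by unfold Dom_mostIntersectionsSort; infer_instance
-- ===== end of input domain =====

-- B replaces A's per-(key,word) set-intersection double loop by a one-pass per-letter
-- counter over currentWords, scoring each key by summing the counts of its distinct letters.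

-- ===== PORT A =====
-- countIntersections: len(set(word1.lower()).intersection(word2.lower()))
def pvCountIntersections (word1 word2 : String) : Int :=
  ((PySem.Set.inter (PySem.Set.ofList (PySem.Chars.lower word1.toList))
      (PySem.Chars.lower word2.toList)).length : Int)

-- interDict = {}; for key in d: count = 0; for word in currentWords: count += …; interDict[key] = count
def pvInterDict (d : List (String × String)) (currentWords : List String) : PySem.Dict String Int :=
  (d.map Prod.fst).foldl
    (fun acc key =>
      acc.insert key (currentWords.foldl (fun count word => count + pvCountIntersections key word) 0))
    PySem.Dict.empty

def mostIntersectionsSort (d : List (String × String)) (currentWords : List String) : List (String × String) :=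
  -- keys = sorted(list(d.keys()), key=lambda x: interDict[x], reverse=True)
  -- array = []; for key in keys: array.append((key, d.get(key)))
  -- d.get(key) always hits (key comes from d); "" is an unreachable default for the Option
  (PySem.List.sorted (d.map Prod.fst) (fun x => (pvInterDict d currentWords).getD x 0) true).foldl
    (fun array key => array ++ [(key, (PySem.Dict.get? (PySem.Dict.ofList d) key).getD "")]) []

-- ===== PORT B =====
-- letterCount[ch] = number of words of currentWords containing ch (built once; the per-word
-- set iteration only feeds order-independent counter increments)
def pvLetterCount (currentWords : List String) : PySem.Dict Char Int :=
  currentWords.foldl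
    (fun acc word =>
      (PySem.Set.ofList (PySem.Chars.lower word.toList)).foldl
        (fun a ch => a.modify ch 0 (· + 1)) acc)
    PySem.Dict.empty

-- score(key) = sum(letterCount.get(ch, 0) for ch in set(key.lower())) (order-independent sum)
def pvScore (currentWords : List String) (key : String) : Int :=
  ((PySem.Set.ofList (PySem.Chars.lower key.toList)).map
    (fun ch => (pvLetterCount currentWords).getD ch 0)).sum

def mostIntersectionsSort_alt (d : List (String × String)) (currentWords : List String) : List (String × String) :=
  -- keys = sorted(d, key=score, reverse=True); return [(key, d[key]) for key in keys]
  -- d[key] always hits (key comes from d); "" is an unreachable default for the Option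
  (PySem.List.sorted (d.map Prod.fst) (pvScore currentWords) true).map
    (fun key => (key, (PySem.Dict.get? (PySem.Dict.ofList d) key).getD ""))

-- ===== PRECONDITION & SPEC =====
def Spec_mostIntersectionsSort (d : List (String × String)) (currentWords : List String) (out : List (String × String)) : Prop := out = mostIntersectionsSort_alt d currentWords
instance (d : List (String × String)) (currentWords : List String) (out : List (String × String)) : Decidable (Spec_mostIntersectionsSort d currentWords out) := by unfold Spec_mostIntersectionsSort; infer_instance

-- ===== CLAIM (what is proved, stated in full; the proofs are below) =====
def Claim_equal_mostIntersectionsSort : Prop := ∀ (d : List (String × String)) (currentWords : List String), Dom_mostIntersectionsSort d currentWords → Spec_mostIntersectionsSort d currentWords (mostIntersectionsSort d currentWords)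

-- ===== LEMMAS AND PROOFS =====

lemma pvLetterCount_getD (ws : List String) (c : Char) (acc : PySem.Dict Char Int) :
    (ws.foldl
      (fun acc word =>
        (PySem.Set.ofList (PySem.Chars.lower word.toList)).foldl
          (fun a ch => a.modify ch 0 (· + 1)) acc)
      acc).getD c 0
      = acc.getD c 0 + (ws.countP (fun w => decide (c ∈ PySem.Chars.lower w.toList)) : Int) := by
  induction ws generalizing acc with
  | nil => simp
  | cons w ws ih =>
    rw [List.foldl_cons, ih, PySem.Dict.getD_foldl_modify_add_one,
      (PySem.Set.nodup_ofList (PySem.Chars.lower w.toList)).count,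
      List.countP_cons]
    by_cases h : c ∈ PySem.Chars.lower w.toList
    · simp [h, PySem.Set.mem_ofList]
      ring
    · simp [h, PySem.Set.mem_ofList]

-- the intersection size of key's letter set with a word is a countP over the set
lemma pvInter_len (k w : String) :
    pvCountIntersections k w
      = ((PySem.Set.ofList (PySem.Chars.lower k.toList)).countP
          (fun ch => decide (ch ∈ PySem.Chars.lower w.toList)) : Int) := by
  simp [pvCountIntersections, PySem.Set.inter, PySem.Set.contains,
    List.countP_eq_length_filter]

-- double counting: summing per-letter word counts = summing per-word intersection sizes
lemma pvSwap (K : List Char) (ws : List String) :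
    (K.map (fun ch => (ws.countP (fun w => decide (ch ∈ PySem.Chars.lower w.toList)) : Int))).sum
      = (ws.map (fun w => (K.countP (fun ch => decide (ch ∈ PySem.Chars.lower w.toList)) : Int))).sum := by
  induction ws with
  | nil => simp
  | cons w ws ih =>
    have h1 : (K.map (fun ch =>
        (((w :: ws)).countP (fun w' => decide (ch ∈ PySem.Chars.lower w'.toList)) : Int))).sum
        = (K.map (fun ch =>
            ((ws.countP (fun w' => decide (ch ∈ PySem.Chars.lower w'.toList)) : Int)
              + if decide (ch ∈ PySem.Chars.lower w.toList) then 1 else 0))).sum := by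
      apply congrArg
      apply List.map_congr_left
      intro ch _
      rw [List.countP_cons]
      push_cast
      ring
    rw [h1, PySem.List.sum_map_add_int, ih, PySem.List.sum_map_ite_one_zero]
    simp
    ring

-- A's per-key count equals B's score for that key (for every key string)
lemma pvScore_eq (ws : List String) (key : String) :
    pvScore ws key
      = ws.foldl (fun count word => count + pvCountIntersections key word) 0 := by
  rw [PySem.List.foldl_add]
  unfold pvScore pvLetterCount
  have h1 : ∀ ch, (ws.foldl
      (fun acc word =>
        (PySem.Set.ofList (PySem.Chars.lower word.toList)).foldl
          (fun a ch => a.modify ch 0 (· + 1)) acc)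
      PySem.Dict.empty).getD ch 0
      = (ws.countP (fun w => decide (ch ∈ PySem.Chars.lower w.toList)) : Int) := by
    intro ch
    rw [pvLetterCount_getD]
    simp
  rw [List.map_congr_left (fun ch _ => h1 ch), pvSwap]
  rw [List.map_congr_left (fun w _ => (pvInter_len key w).symm)]
  simp

-- a dict built by inserting f k at each k of l: lookup of a member returns f k
lemma pvFoldD_not_mem {l : List String} {x : String} (f : String → Int)
    (acc : PySem.Dict String Int) (hx : x ∉ l) :
    (l.foldl (fun a k => a.insert k (f k)) acc).getD x 0 = acc.getD x 0 := by
  induction l generalizing acc with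
  | nil => rfl
  | cons k t ih =>
    simp only [List.mem_cons, not_or] at hx
    rw [List.foldl_cons, ih _ hx.2, PySem.Dict.getD_insert_of_ne]
    exact hx.1

lemma pvFoldD_mem {l : List String} {x : String} (f : String → Int)
    (acc : PySem.Dict String Int) (hx : x ∈ l) :
    (l.foldl (fun a k => a.insert k (f k)) acc).getD x 0 = f x := by
  induction l generalizing acc with
  | nil => cases hx
  | cons k t ih =>
    rw [List.foldl_cons]
    by_cases ht : x ∈ t
    · exact ih _ ht
    · have hk : x = k := by rcases List.mem_cons.mp hx with h | h; exact h; exact absurd h ht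
      subst hk
      rw [pvFoldD_not_mem f _ ht, PySem.Dict.getD_insert_self]

-- sorted only looks at key values of list members
lemma pvInsertBy_congr {α : Type} (b1 b2 : α → α → Bool) (x : α) (ys : List α)
    (h : ∀ y ∈ ys, b1 x y = b2 x y) :
    PySem.List.insertBy b1 x ys = PySem.List.insertBy b2 x ys := by
  induction ys with
  | nil => rfl
  | cons y ys ih =>
    have hy := h y (by simp)
    simp only [PySem.List.insertBy]
    rw [hy]
    by_cases hb : b2 x y
    · simp [hb]
    · simp [hb, ih (fun z hz => h z (by simp [hz]))]

lemma pvFoldl_insertBy_congr {α : Type} (b1 b2 : α → α → Bool) (xs : List α) :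
    ∀ (acc : List α),
      (∀ a, (a ∈ xs ∨ a ∈ acc) → ∀ b, (b ∈ xs ∨ b ∈ acc) → b1 a b = b2 a b) →
      xs.foldl (fun acc x => PySem.List.insertBy b1 x acc) acc
        = xs.foldl (fun acc x => PySem.List.insertBy b2 x acc) acc := by
  induction xs with
  | nil => intro acc _; rfl
  | cons x xs ih =>
    intro acc hb
    rw [List.foldl_cons, List.foldl_cons]
    have hacc : PySem.List.insertBy b1 x acc = PySem.List.insertBy b2 x acc := by
      apply pvInsertBy_congr
      intro y hy
      exact hb x (Or.inl (by simp)) y (Or.inr hy)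
    rw [hacc]
    apply ih
    intro a ha b hbm
    have hmem : ∀ z, z ∈ PySem.List.insertBy b2 x acc → z ∈ x :: xs ∨ z ∈ acc := by
      intro z hz
      rcases (PySem.List.mem_insertBy b2 x z acc).mp hz with h | h
      · exact Or.inl (by simp [h])
      · exact Or.inr h
    apply hb
    · rcases ha with h | h
      · exact Or.inl (by simp [h])
      · exact (hmem a h).imp_left id
    · rcases hbm with h | h
      · exact Or.inl (by simp [h])
      · exact (hmem b h).imp_left id

lemma pvSorted_congr {α : Type} (xs : List α) (k1 k2 : α → Int) (rev : Bool)
    (h : ∀ x ∈ xs, k1 x = k2 x) :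
    PySem.List.sorted xs k1 rev = PySem.List.sorted xs k2 rev := by
  unfold PySem.List.sorted
  apply pvFoldl_insertBy_congr
  intro a ha b hb
  rcases ha with ha | ha
  · rcases hb with hb | hb
    · cases rev <;> simp [h a ha, h b hb]
    · simp at hb
  · simp at ha

-- ===== VERDICT (by name: the statement is the Claim_ definition above) =====
theorem mostIntersectionsSort_spec : Claim_equal_mostIntersectionsSort := by
  intro d currentWords _
  unfold Spec_mostIntersectionsSort mostIntersectionsSort mostIntersectionsSort_alt
  rw [PySem.List.foldl_append_singleton_eq_map, List.nil_append]
  congr 1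
  apply pvSorted_congr
  intro x hx
  unfold pvInterDict
  rw [pvFoldD_mem _ _ hx, pvScore_eq]
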